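-- pv_equiv track=rewrite | github.com/dalmuri/Algorithm | 백준/Silver/1105. 팔/팔.py | calc
-- ===== SOURCE A (Python) =====
-- def calc(l, r, answer):
--     if len(l) <= 0:
--         return answer
--
--     if l[0] < r[0]:
--         return answer
--     elif l[0] != "8":
--         return calc(l[1:], r[1:], answer)
--     else:
--         return calc(l[1:], r[1:], answer + 1)
-- ===== SOURCE B (Python) =====
-- def calc(l, r, answer):
--     for i in range(len(l)):
--         if l[i] < r[i]:
--             return answer
--         if l[i] == "8":
--             answer += 1
--     return answer
-- ===== Notes on version B (the rewrite author's own statement) =====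
-- stated objective: faster
-- what changed: Replaced the recursive scan that rebuilds l[1:] and r[1:] at every step with a single iterative index loop accumulating the count in place.
import Mathlib
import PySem

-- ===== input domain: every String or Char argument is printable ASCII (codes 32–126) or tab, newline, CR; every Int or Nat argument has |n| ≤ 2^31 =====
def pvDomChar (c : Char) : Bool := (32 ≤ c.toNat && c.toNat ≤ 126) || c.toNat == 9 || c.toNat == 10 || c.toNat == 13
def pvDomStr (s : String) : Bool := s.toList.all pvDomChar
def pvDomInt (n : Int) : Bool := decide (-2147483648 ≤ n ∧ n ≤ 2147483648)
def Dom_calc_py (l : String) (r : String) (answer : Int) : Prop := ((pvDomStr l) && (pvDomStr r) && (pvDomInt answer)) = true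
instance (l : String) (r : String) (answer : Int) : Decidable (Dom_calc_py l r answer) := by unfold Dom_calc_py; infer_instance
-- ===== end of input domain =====

-- B replaces A's recursion (which copies l[1:]/r[1:] each step) by one index loop; faster (no slice copies).

-- ===== PORT A =====
-- recursive transliteration of A over the character lists; the `[]` case for r is
-- where Python raises IndexError (excluded by Pre_calc_py; the value there is unclaimed)
def calcA : List Char → List Char → Int → Int
  | [], _, answer => answer
  | _ :: _, [], answer => answer            -- Python: IndexError (outside Pre_calc_py)
  | c :: ls, d :: rs, answer =>
      if c < d then answer
      else if c ≠ '8' then calcA ls rs answer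
      else calcA ls rs (answer + 1)

def calc_py (l : String) (r : String) (answer : Int) : Int :=
  calcA l.toList r.toList answer

-- ===== PORT B =====
-- iterative index loop of Source B: for i in range(len(l)): …
def calcLoopB (l r : List Char) (i : Nat) (answer : Int) : Int :=
  if h : i < l.length then
    match hr : r[i]? with
    | none => answer                        -- Python: IndexError (outside Pre_calc_py)
    | some d =>
        if l[i] < d then answer
        else calcLoopB l r (i + 1) (if l[i] == '8' then answer + 1 else answer)
  else answer
termination_by l.length - i

def calc_py_alt (l : String) (r : String) (answer : Int) : Int :=
  calcLoopB l.toList r.toList 0 answer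

-- ===== PRECONDITION & SPEC =====
-- Pre_ excludes exactly the inputs on which Python A raises IndexError: r exhausted
-- before l with no earlier digit-wise early return.
def Pre_calc_py (l : String) (r : String) (answer : Int) : Prop :=
  l.toList.length ≤ r.toList.length ∨
    ∃ i < r.toList.length, l.toList.getD i ' ' < r.toList.getD i ' '
instance (l : String) (r : String) (answer : Int) : Decidable (Pre_calc_py l r answer) := by
  unfold Pre_calc_py; infer_instance

def pvWitness_calc_py : String × String × Int := ("88", "98", 0)

def Spec_calc_py (l : String) (r : String) (answer : Int) (out : Int) : Prop := out = calc_py_alt l r answer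
instance (l : String) (r : String) (answer : Int) (out : Int) : Decidable (Spec_calc_py l r answer out) := by unfold Spec_calc_py; infer_instance

-- ===== CLAIM (what is proved, stated in full; the proofs are below) =====
def Claim_equal_calc_py : Prop := ∀ (l : String) (r : String) (answer : Int), Dom_calc_py l r answer → Pre_calc_py l r answer → Spec_calc_py l r answer (calc_py l r answer)

-- ===== LEMMAS AND PROOFS =====

-- the loop from index i computes A's recursion on the suffixes from i
theorem calcLoopB_eq_calcA (l r : List Char) (i : Nat) (answer : Int) :
    calcLoopB l r i answer = calcA (l.drop i) (r.drop i) answer := by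
  rw [calcLoopB]
  split
  · next h =>
    have hl : l.drop i = l[i] :: l.drop (i + 1) := List.drop_eq_getElem_cons h
    cases hr : r[i]? with
    | none =>
      have hri : r.length ≤ i := by
        by_contra hc
        simp [List.getElem?_eq_getElem (Nat.lt_of_not_le hc)] at hr
      have hre : r.drop i = [] := List.drop_eq_nil_of_le hri
      rw [hl, hre]
      rfl
    | some d =>
      have hir : i < r.length := by
        by_contra hc
        simp [List.getElem?_eq_none (Nat.le_of_not_lt hc)] at hr
      have hd : r[i] = d := by
        have := List.getElem?_eq_getElem hir
        rw [hr] at this; exact (Option.some.injEq _ _).mp this.symm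
      have hrd : r.drop i = d :: r.drop (i + 1) := by
        rw [List.drop_eq_getElem_cons hir, hd]
      rw [hl, hrd, calcA]
      by_cases h8 : l[i] = '8' <;>
        simp [h8, calcLoopB_eq_calcA l r (i + 1)]
  · next h =>
    have hle : l.drop i = [] := List.drop_eq_nil_of_le (Nat.le_of_not_lt h)
    rw [hle]
    rfl
termination_by l.length - i

-- ===== VERDICT (by name: the statement is the Claim_ definition above) =====
theorem calc_py_spec : Claim_equal_calc_py := by
  intro l r answer _ _
  unfold Spec_calc_py calc_py calc_py_alt
  rw [calcLoopB_eq_calcA]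
  simp
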